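-- pv_equiv track=rewrite | github.com/entropy-research/Devon | devon_agent/udiff.py | match_fence
-- ===== SOURCE A (Python) =====
-- def levenshtein_distance(s1, s2):
--     m, n = len(s1), len(s2)
--     dp = [[0] * (n + 1) for _ in range(m + 1)]
--
--     for i in range(m + 1):
--         dp[i][0] = i
--     for j in range(n + 1):
--         dp[0][j] = j
--
--     for i in range(1, m + 1):
--         for j in range(1, n + 1):
--             if s1[i - 1] == s2[j - 1]:
--                 dp[i][j] = dp[i - 1][j - 1]
--             else:
--                 dp[i][j] = min(dp[i][j - 1], dp[i - 1][j], dp[i - 1][j - 1]) + 1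
--
--     return dp[m][n]
--
-- def is_fuzzy_match(s1, s2, threshold=1):
--     for a, b in zip(s1, s2):
--         distance = levenshtein_distance(a, b)
--         if distance > threshold:
--             return False
--     return True
--
-- def match_fence(lines, fence, start_index=0):
--     subset_length = len(fence)
--
--     if subset_length > 0:
--         for i in range(start_index, len(lines) - subset_length + 1):
--             match = [line[1] for line in lines[i : i + subset_length]]
--
--             if is_fuzzy_match(match, fence, 1):
--                 return lines[i][0], lines[i + subset_length - 1][0], i
--
--     return None, None, None
-- ===== SOURCE B (Python) =====
-- def _close(a, b):
--     # edit distance <= 1: strip the common suffix, then allow one edit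
--     la, lb = len(a), len(b)
--     while la > 0 and lb > 0 and a[la - 1] == b[lb - 1]:
--         la -= 1
--         lb -= 1
--     if la == lb:
--         return la == 0 or a[:la - 1] == b[:lb - 1]
--     if la + 1 == lb:
--         return a[:la] == b[:lb - 1]
--     if lb + 1 == la:
--         return a[:la - 1] == b[:lb]
--     return False
--
-- def match_fence(lines, fence, start_index=0):
--     n = len(fence)
--     if n > 0:
--         for i in range(start_index, len(lines) - n + 1):
--             window = lines[i : i + n]
--             if all(_close(l[1], f) for l, f in zip(window, fence)):
--                 return lines[i][0], lines[i + n - 1][0], i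
--     return None, None, None
-- ===== Notes on version B (the rewrite author's own statement) =====
-- stated objective: alternative
-- what changed: Replaces the full Levenshtein DP matrix per line pair with a single-pass bounded distance-<=1 check (strip the common suffix, then allow exactly one edit), since only 'distance <= 1' is ever consulted.
-- outside the precondition, e.g. on match_fence([(1, 'a'), (2, 'b')], ['zz', 'b'], -3): A returns (1, 2, -2), B returns (1, 2, -2)
import Mathlib
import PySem

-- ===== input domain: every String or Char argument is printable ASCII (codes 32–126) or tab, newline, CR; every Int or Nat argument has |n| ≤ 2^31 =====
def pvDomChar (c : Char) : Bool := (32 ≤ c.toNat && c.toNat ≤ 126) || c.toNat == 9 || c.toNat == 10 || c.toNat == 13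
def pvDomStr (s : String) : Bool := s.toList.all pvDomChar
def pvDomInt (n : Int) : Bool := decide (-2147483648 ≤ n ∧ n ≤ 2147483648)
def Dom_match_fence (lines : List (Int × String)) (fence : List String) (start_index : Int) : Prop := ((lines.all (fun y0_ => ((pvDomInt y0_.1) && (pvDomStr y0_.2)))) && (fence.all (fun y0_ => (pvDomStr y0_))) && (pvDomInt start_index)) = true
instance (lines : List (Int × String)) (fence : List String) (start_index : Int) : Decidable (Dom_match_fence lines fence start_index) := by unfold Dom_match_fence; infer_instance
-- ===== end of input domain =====

-- Alternative implementation: B replaces the per-pair Levenshtein DP matrix by a single-pass bounded distance-≤1 check (strip common suffix, one-edit compare); same scan over windows, same return value.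

-- ===== PORT A =====
-- dp[i][j] read/write on the list-of-lists matrix
def pvMget (d : List (List Nat)) (i j : Nat) : Nat := (d.getD i []).getD j 0
def pvMset (d : List (List Nat)) (i j v : Nat) : List (List Nat) := d.set i ((d.getD i []).set j v)

-- literal port of levenshtein_distance (full DP matrix)
def pvLev (s1 s2 : String) : Nat :=
  let c1 := s1.toList
  let c2 := s2.toList
  let m := c1.length
  let n := c2.length
  let d0 := List.replicate (m+1) (List.replicate (n+1) 0)
  let d1 := (List.range (m+1)).foldl (fun d i => pvMset d i 0 i) d0
  let d2 := (List.range (n+1)).foldl (fun d j => pvMset d 0 j j) d1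
  let d3 := (List.range' 1 m).foldl (fun d i =>
      (List.range' 1 n).foldl (fun d j =>
        if c1.getD (i-1) ' ' = c2.getD (j-1) ' ' then
          pvMset d i j (pvMget d (i-1) (j-1))
        else
          pvMset d i j (min (pvMget d i (j-1)) (min (pvMget d (i-1) j) (pvMget d (i-1) (j-1))) + 1)) d) d2
  pvMget d3 m n

-- port of is_fuzzy_match's loop over zip(s1, s2) with early return False
def pvFuzzyLoop (t : Nat) : List (String × String) → Bool
  | [] => true
  | (a, b) :: rest => if t < pvLev a b then false else pvFuzzyLoop t rest

def pvIsFuzzyMatch (s1 s2 : List String) (t : Nat) : Bool := pvFuzzyLoop t (s1.zip s2)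

-- port of match_fence's for-loop with early return
def pvFenceLoop (lines : List (Int × String)) (fence : List String) (n : Nat) :
    List Int → Option Int × Option Int × Option Int
  | [] => (none, none, none)
  | i :: rest =>
    let window := PySem.List.slice lines (some i) (some (i + (n : Int)))
    if pvIsFuzzyMatch (window.map Prod.snd) fence 1 then
      ((PySem.List.pyGet? lines i).map Prod.fst,
       (PySem.List.pyGet? lines (i + (n : Int) - 1)).map Prod.fst,
       some i)
    else pvFenceLoop lines fence n rest

def match_fence (lines : List (Int × String)) (fence : List String) (start_index : Int) : Option Int × Option Int × Option Int :=
  let n := fence.length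
  if 0 < n then
    pvFenceLoop lines fence n (PySem.List.pyRange start_index ((lines.length : Int) - (n : Int) + 1) 1)
  else (none, none, none)

-- ===== PORT B =====
-- the while-loop of _close: strip the common suffix, returning the remaining lengths
def pvCloseStrip (a b : List Char) (la lb : Nat) : Nat × Nat :=
  if 0 < la ∧ 0 < lb ∧ a.getD (la - 1) ' ' = b.getD (lb - 1) ' ' then
    pvCloseStrip a b (la - 1) (lb - 1)
  else (la, lb)
termination_by la
decreasing_by omega

-- literal port of _close
def pvClose (a b : List Char) : Bool :=
  let p := pvCloseStrip a b a.length b.length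
  let la := p.1
  let lb := p.2
  if la = lb then decide (la = 0) || (a.take (la - 1) == b.take (lb - 1))
  else if la + 1 = lb then a.take la == b.take (lb - 1)
  else if lb + 1 = la then a.take (la - 1) == b.take lb
  else false

-- port of all(_close(l[1], f) for l, f in zip(window, fence))
def pvAllClose : List ((Int × String) × String) → Bool
  | [] => true
  | (l, f) :: rest => pvClose l.2.toList f.toList && pvAllClose rest

def pvAltLoop (lines : List (Int × String)) (fence : List String) (n : Nat) :
    List Int → Option Int × Option Int × Option Int
  | [] => (none, none, none)
  | i :: rest =>
    let window := PySem.List.slice lines (some i) (some (i + (n : Int)))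
    if pvAllClose (window.zip fence) then
      ((PySem.List.pyGet? lines i).map Prod.fst,
       (PySem.List.pyGet? lines (i + (n : Int) - 1)).map Prod.fst,
       some i)
    else pvAltLoop lines fence n rest

def match_fence_alt (lines : List (Int × String)) (fence : List String) (start_index : Int) : Option Int × Option Int × Option Int :=
  let n := fence.length
  if 0 < n then
    pvAltLoop lines fence n (PySem.List.pyRange start_index ((lines.length : Int) - (n : Int) + 1) 1)
  else (none, none, none)

-- ===== PRECONDITION & SPEC =====
-- Pre_ excludes inputs with a nonempty fence and start_index below -len(lines) whose scan begins at clamped pseudo-windows: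
-- there A can raise IndexError on lines[i] (an empty clamped window fuzzy-matches vacuously); the closed-form bound
-- over-approximates the raising set, so it also excludes some inputs on which A returns (B returns the same value there).
def Pre_match_fence (lines : List (Int × String)) (fence : List String) (start_index : Int) : Prop :=
  fence = [] ∨ -(lines.length : Int) ≤ start_index ∨ (lines.length : Int) - (fence.length : Int) < start_index
instance (lines : List (Int × String)) (fence : List String) (start_index : Int) : Decidable (Pre_match_fence lines fence start_index) := by unfold Pre_match_fence; infer_instance

def pvWitness_match_fence : (List (Int × String)) × List String × Int := ([(1, "ab"), (2, "cd")], ["ce"], 0)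

def Spec_match_fence (lines : List (Int × String)) (fence : List String) (start_index : Int) (out : Option Int × Option Int × Option Int) : Prop := out = match_fence_alt lines fence start_index
instance (lines : List (Int × String)) (fence : List String) (start_index : Int) (out : Option Int × Option Int × Option Int) : Decidable (Spec_match_fence lines fence start_index out) := by unfold Spec_match_fence; infer_instance

-- ===== CLAIM (what is proved, stated in full; the proofs are below) =====
def Claim_equal_match_fence : Prop := ∀ (lines : List (Int × String)) (fence : List String) (start_index : Int), Dom_match_fence lines fence start_index → Pre_match_fence lines fence start_index → Spec_match_fence lines fence start_index (match_fence lines fence start_index)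

-- ===== LEMMAS AND PROOFS =====

-- reference: first-character Levenshtein distance
def edL : List Char → List Char → Nat
  | [], b => b.length
  | a, [] => a.length
  | x :: xs, y :: ys =>
    if x = y then edL xs ys
    else 1 + min (edL xs (y :: ys)) (min (edL (x :: xs) ys) (edL xs ys))
termination_by a b => a.length + b.length
decreasing_by all_goals (simp; try omega)

theorem edL_nil_right (a : List Char) : edL a [] = a.length := by cases a <;> simp [edL]

theorem edL_eq_zero_iff (a b : List Char) : edL a b = 0 ↔ a = b := by
  induction a, b using edL.induct with
  | case1 b => simp [edL, List.length_eq_zero_iff, eq_comm]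
  | case2 a h => cases a with
    | nil => simp [edL]
    | cons x xs => simp [edL]
  | case3 xs x ys ih => simp [edL, ih]
  | case4 x xs y ys h ih1 ih2 ih3 => simp [edL, h]

theorem strip_le (a b : List Char) (la lb : Nat) :
    (pvCloseStrip a b la lb).1 ≤ la ∧ (pvCloseStrip a b la lb).2 ≤ lb := by
  induction la, lb using pvCloseStrip.induct a b with
  | case1 la lb h ih => rw [pvCloseStrip, if_pos h]; omega
  | case2 la lb h =>
    rw [pvCloseStrip, if_neg h]
    simp

theorem strip_dropLast (a b : List Char) (la lb : Nat) (ha : la < a.length) (hb : lb < b.length) :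
    pvCloseStrip a.dropLast b.dropLast la lb = pvCloseStrip a b la lb := by
  induction la, lb using pvCloseStrip.induct a b with
  | case1 la lb h ih =>
    conv_rhs => rw [pvCloseStrip, if_pos h]
    rw [pvCloseStrip]
    have e1 : a.dropLast.getD (la-1) ' ' = a.getD (la-1) ' ' := by
      have h2 : la - 1 < a.length := by omega
      simp [List.getD, h2, (by omega : la - 1 < a.length - 1), List.getElem_dropLast]
    have e2 : b.dropLast.getD (lb-1) ' ' = b.getD (lb-1) ' ' := by
      have h2 : lb - 1 < b.length := by omega
      simp [List.getD, h2, (by omega : lb - 1 < b.length - 1), List.getElem_dropLast]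
    rw [if_pos (by rw [e1, e2]; exact h)]
    exact ih (by omega) (by omega)
  | case2 la lb h =>
    conv_rhs => rw [pvCloseStrip, if_neg h]
    rw [pvCloseStrip]
    rw [if_neg]
    intro ⟨h1, h2, h3⟩
    have e1 : a.dropLast.getD (la-1) ' ' = a.getD (la-1) ' ' := by
      have hh : la - 1 < a.length := by omega
      simp [List.getD, hh, (by omega : la - 1 < a.length - 1), List.getElem_dropLast]
    have e2 : b.dropLast.getD (lb-1) ' ' = b.getD (lb-1) ' ' := by
      have hh : lb - 1 < b.length := by omega
      simp [List.getD, hh, (by omega : lb - 1 < b.length - 1), List.getElem_dropLast]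
    exact h ⟨h1, h2, by rw [← e1, ← e2]; exact h3⟩

theorem strip_step (a b : List Char) (ha : a ≠ []) (hb : b ≠ []) (h : a.getLast ha = b.getLast hb) :
    pvCloseStrip a b a.length b.length = pvCloseStrip a.dropLast b.dropLast a.dropLast.length b.dropLast.length := by
  have la := List.length_pos_of_ne_nil ha
  have lb := List.length_pos_of_ne_nil hb
  have ga : a.getD (a.length - 1) ' ' = a.getLast ha := by
    simp [List.getD, (by omega : a.length - 1 < a.length)]
    exact List.getElem_length_sub_one_eq_getLast (by omega)
  have gb : b.getD (b.length - 1) ' ' = b.getLast hb := by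
    simp [List.getD, (by omega : b.length - 1 < b.length)]
    exact List.getElem_length_sub_one_eq_getLast (by omega)
  rw [pvCloseStrip, if_pos ⟨la, lb, by rw [ga, gb, h]⟩]
  rw [← strip_dropLast a b _ _ (by omega) (by omega)]
  simp [List.length_dropLast]

theorem strip_stop (a b : List Char) (h : ∀ (ha : a ≠ []) (hb : b ≠ []), a.getLast ha ≠ b.getLast hb) :
    pvCloseStrip a b a.length b.length = (a.length, b.length) := by
  rw [pvCloseStrip, if_neg]
  rintro ⟨h1, h2, h3⟩
  have ha : a ≠ [] := by intro e; simp [e] at h1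
  have hb : b ≠ [] := by intro e; simp [e] at h2
  apply h ha hb
  have ga : a.getD (a.length - 1) ' ' = a.getLast ha := by
    simp [List.getD, (by omega : a.length - 1 < a.length)]
    exact List.getElem_length_sub_one_eq_getLast (by omega)
  have gb : b.getD (b.length - 1) ' ' = b.getLast hb := by
    simp [List.getD, (by omega : b.length - 1 < b.length)]
    exact List.getElem_length_sub_one_eq_getLast (by omega)
  rw [← ga, ← gb, h3]

theorem rev_eq_getLast_cons (l : List Char) (h : l ≠ []) : l.reverse = l.getLast h :: l.dropLast.reverse := by
  conv_lhs => rw [← List.dropLast_append_getLast h]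
  simp

theorem pvClose_nil_left (b : List Char) : pvClose [] b = decide (edL ([] : List Char) b.reverse ≤ 1) := by
  have hs : pvCloseStrip [] b 0 b.length = (0, b.length) := by rw [pvCloseStrip]; simp
  simp only [pvClose, List.length_nil, hs]
  match b with
  | [] => simp [edL]
  | [y] => simp [edL]
  | y :: z :: zs => simp [edL]

theorem pvClose_nil_right (a : List Char) : pvClose a [] = decide (edL a.reverse ([] : List Char) ≤ 1) := by
  have hs : pvCloseStrip a [] a.length 0 = (a.length, 0) := by rw [pvCloseStrip]; simp
  simp only [pvClose, List.length_nil, hs]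
  rw [edL_nil_right]
  match a with
  | [] => simp
  | [y] => simp
  | y :: z :: zs => simp

theorem pvClose_mismatch (a b : List Char) (ha : a ≠ []) (hb : b ≠ []) (hne : a.getLast ha ≠ b.getLast hb) :
    pvClose a b = decide (edL a.reverse b.reverse ≤ 1) := by
  have la := List.length_pos_of_ne_nil ha
  have lb := List.length_pos_of_ne_nil hb
  have hs := strip_stop a b (fun ha' hb' => hne)
  have key : (edL a.reverse b.reverse ≤ 1) ↔ (a.dropLast = b ∨ a = b.dropLast ∨ a.dropLast = b.dropLast) := by
    rw [rev_eq_getLast_cons a ha, rev_eq_getLast_cons b hb]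
    rw [edL, if_neg hne]
    constructor
    · intro hle
      have h0 : edL a.dropLast.reverse (b.getLast hb :: b.dropLast.reverse) = 0 ∨
          edL (a.getLast ha :: a.dropLast.reverse) b.dropLast.reverse = 0 ∨
          edL a.dropLast.reverse b.dropLast.reverse = 0 := by omega
      rcases h0 with h0 | h0 | h0
      · left
        have := (edL_eq_zero_iff _ _).mp h0
        rw [← rev_eq_getLast_cons b hb] at this
        exact List.reverse_inj.mp this
      · right; left
        have := (edL_eq_zero_iff _ _).mp h0
        rw [← rev_eq_getLast_cons a ha] at this
        exact List.reverse_inj.mp this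
      · right; right
        exact List.reverse_inj.mp ((edL_eq_zero_iff _ _).mp h0)
    · intro h0
      rcases h0 with h0 | h0 | h0
      · have : edL a.dropLast.reverse (b.getLast hb :: b.dropLast.reverse) = 0 := by
          rw [← rev_eq_getLast_cons b hb]
          exact (edL_eq_zero_iff _ _).mpr (by rw [h0])
        omega
      · have : edL (a.getLast ha :: a.dropLast.reverse) b.dropLast.reverse = 0 := by
          rw [← rev_eq_getLast_cons a ha]
          exact (edL_eq_zero_iff _ _).mpr (by rw [h0])
        omega
      · have : edL a.dropLast.reverse b.dropLast.reverse = 0 := (edL_eq_zero_iff _ _).mpr (by rw [h0])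
        omega
  have lda : a.dropLast.length = a.length - 1 := by simp
  have ldb : b.dropLast.length = b.length - 1 := by simp
  simp only [pvClose, hs, List.take_length, ← List.dropLast_eq_take]
  rw [Bool.eq_iff_iff]
  simp only [key]
  by_cases h1 : a.length = b.length
  · simp only [if_pos h1]
    simp only [Bool.or_eq_true, decide_eq_true_eq, beq_iff_eq]
    constructor
    · rintro (h | h); · omega
      · exact Or.inr (Or.inr h)
    · rintro (h | h | h)
      · exfalso; have := congrArg List.length h; rw [lda] at this; omega
      · exfalso; have := congrArg List.length h; rw [ldb] at this; omega
      · exact Or.inr h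
  · rw [if_neg h1]
    by_cases h2 : a.length + 1 = b.length
    · simp only [if_pos h2, beq_iff_eq, decide_eq_true_eq]
      constructor
      · intro h; exact Or.inr (Or.inl h)
      · rintro (h | h | h)
        · exfalso; have := congrArg List.length h; rw [lda] at this; omega
        · exact h
        · exfalso; have := congrArg List.length h; rw [lda, ldb] at this; omega
    · rw [if_neg h2]
      by_cases h3 : b.length + 1 = a.length
      · simp only [if_pos h3, beq_iff_eq, decide_eq_true_eq]
        constructor
        · intro h; exact Or.inl h
        · rintro (h | h | h)
          · exact h
          · exfalso; have := congrArg List.length h; rw [ldb] at this; omega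
          · exfalso; have := congrArg List.length h; rw [lda, ldb] at this; omega
      · rw [if_neg h3]
        simp only [decide_eq_true_eq, Bool.false_eq_true, false_iff]
        rintro (h | h | h)
        · have := congrArg List.length h; rw [lda] at this; omega
        · have := congrArg List.length h; rw [ldb] at this; omega
        · have := congrArg List.length h; rw [lda, ldb] at this; omega

theorem take_dropLast' (l : List Char) (k : Nat) (h : k ≤ l.length - 1) : l.take k = l.dropLast.take k := by
  rw [List.dropLast_eq_take, List.take_take]
  congr 1; omega

theorem pvClose_step (a b : List Char) (ha : a ≠ []) (hb : b ≠ []) (h : a.getLast ha = b.getLast hb) :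
    pvClose a b = pvClose a.dropLast b.dropLast := by
  have la := List.length_pos_of_ne_nil ha
  have lb := List.length_pos_of_ne_nil hb
  have hs := strip_step a b ha hb h
  have hle := strip_le a.dropLast b.dropLast a.dropLast.length b.dropLast.length
  simp only [pvClose, hs]
  rw [take_dropLast' a _ (by simp at hle ⊢; omega), take_dropLast' a _ (by simp at hle ⊢; omega),
      take_dropLast' b _ (by simp at hle ⊢; omega), take_dropLast' b _ (by simp at hle ⊢; omega)]

theorem pvClose_eq (a b : List Char) : pvClose a b = decide (edL a.reverse b.reverse ≤ 1) := by
  suffices H : ∀ (N : Nat) (a b : List Char), a.length ≤ N → pvClose a b = decide (edL a.reverse b.reverse ≤ 1) from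
    H a.length a b le_rfl
  intro N
  induction N with
  | zero =>
    intro a b h
    have : a = [] := List.eq_nil_of_length_eq_zero (by omega)
    subst this
    rw [List.reverse_nil]; exact pvClose_nil_left b
  | succ N ih =>
    intro a b hlen
    rcases eq_or_ne a [] with rfl | ha
    · rw [List.reverse_nil]; exact pvClose_nil_left b
    rcases eq_or_ne b [] with rfl | hb
    · rw [List.reverse_nil]; exact pvClose_nil_right a
    by_cases hl : a.getLast ha = b.getLast hb
    · have la := List.length_pos_of_ne_nil ha
      rw [pvClose_step a b ha hb hl, ih a.dropLast b.dropLast (by simp; omega)]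
      have he : edL a.reverse b.reverse = edL a.dropLast.reverse b.dropLast.reverse := by
        rw [rev_eq_getLast_cons a ha, rev_eq_getLast_cons b hb, hl]
        simp [edL]
      rw [he]
    · exact pvClose_mismatch a b ha hb hl

def Emat (c1 c2 : List Char) (i j : Nat) : Nat := edL ((c1.take i).reverse) ((c2.take j).reverse)

theorem Emat_zero_left (c1 c2 : List Char) (j : Nat) (hj : j ≤ c2.length) : Emat c1 c2 0 j = j := by
  simp [Emat, edL]; omega

theorem Emat_zero_right (c1 c2 : List Char) (i : Nat) (hi : i ≤ c1.length) : Emat c1 c2 i 0 = i := by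
  simp [Emat, edL_nil_right]; omega

theorem Emat_succ (c1 c2 : List Char) (i j : Nat) (hi1 : 1 ≤ i) (hi : i ≤ c1.length)
    (hj1 : 1 ≤ j) (hj : j ≤ c2.length) :
    Emat c1 c2 i j = if c1.getD (i-1) ' ' = c2.getD (j-1) ' ' then Emat c1 c2 (i-1) (j-1)
      else min (Emat c1 c2 i (j-1)) (min (Emat c1 c2 (i-1) j) (Emat c1 c2 (i-1) (j-1))) + 1 := by
  have hi' : i - 1 < c1.length := by omega
  have hj' : j - 1 < c2.length := by omega
  have ta : c1.take i = c1.take (i-1) ++ [c1[i-1]] := by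
    have := List.take_succ_eq_append_getElem hi'
    rw [← this]; congr 1; omega
  have tb : c2.take j = c2.take (j-1) ++ [c2[j-1]] := by
    have := List.take_succ_eq_append_getElem hj'
    rw [← this]; congr 1; omega
  have ga : c1.getD (i-1) ' ' = c1[i-1] := by simp [List.getD, hi']
  have gb : c2.getD (j-1) ' ' = c2[j-1] := by simp [List.getD, hj']
  simp only [Emat, ta, tb, List.reverse_append, List.reverse_cons, List.reverse_nil,
    List.nil_append, List.cons_append, ga, gb]
  rw [edL]
  by_cases h : c1[i-1] = c2[j-1]
  · simp [h]
  · simp only [if_neg h]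
    omega

def GoodM (m n : Nat) (d : List (List Nat)) (F : Nat → Nat → Nat) : Prop :=
  d.length = m+1 ∧ (∀ i, i ≤ m → (d.getD i []).length = n+1) ∧
    ∀ i, i ≤ m → ∀ j, j ≤ n → pvMget d i j = F i j

theorem mrow_set_self {d : List (List Nat)} {i : Nat} (hid : i < d.length) (j v : Nat) :
    (pvMset d i j v).getD i [] = (d.getD i []).set j v := by
  simp [pvMset, List.getD, hid]

theorem mrow_set_ne {d : List (List Nat)} {i i' : Nat} (h : i' ≠ i) (j v : Nat) :
    (pvMset d i j v).getD i' [] = d.getD i' [] := by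
  simp only [pvMset, List.getD]
  rw [List.getElem?_set_ne (Ne.symm h)]

theorem rget_set_self {l : List Nat} {j : Nat} (hj : j < l.length) (v : Nat) :
    (l.set j v).getD j 0 = v := by
  simp [List.getD, hj]

theorem rget_set_ne {l : List Nat} {j j' : Nat} (h : j' ≠ j) (v : Nat) :
    (l.set j v).getD j' 0 = l.getD j' 0 := by
  simp only [List.getD]
  rw [List.getElem?_set_ne (Ne.symm h)]

theorem GoodM_set {m n : Nat} {d : List (List Nat)} {F : Nat → Nat → Nat}
    (h : GoodM m n d F) {i j : Nat} (hi : i ≤ m) (hj : j ≤ n) (v : Nat) :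
    GoodM m n (pvMset d i j v) (fun i' j' => if i' = i ∧ j' = j then v else F i' j') := by
  obtain ⟨hlen, hrow, hval⟩ := h
  have hid : i < d.length := by omega
  have hjd : j < (d.getD i []).length := by rw [hrow i hi]; omega
  refine ⟨by simp [pvMset, hlen], ?_, ?_⟩
  · intro i' hi'
    by_cases he : i' = i
    · subst he
      rw [mrow_set_self hid, List.length_set]
      exact hrow i' hi'
    · rw [mrow_set_ne he]
      exact hrow i' hi'
  · intro i' hi' j' hj'
    unfold pvMget
    beta_reduce
    by_cases he : i' = i
    · subst he
      rw [mrow_set_self hid]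
      by_cases hje : j' = j
      · subst hje
        rw [rget_set_self hjd, if_pos ⟨rfl, rfl⟩]
      · rw [rget_set_ne hje, if_neg (by tauto)]
        exact hval i' hi' j' hj'
    · rw [mrow_set_ne he, if_neg (by tauto)]
      exact hval i' hi' j' hj'

theorem GoodM_congr {m n : Nat} {d : List (List Nat)} {F F' : Nat → Nat → Nat}
    (h : GoodM m n d F) (he : ∀ i, i ≤ m → ∀ j, j ≤ n → F i j = F' i j) : GoodM m n d F' := by
  obtain ⟨h1, h2, h3⟩ := h
  exact ⟨h1, h2, fun i hi j hj => (h3 i hi j hj).trans (he i hi j hj)⟩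

theorem GoodM_init (m n : Nat) :
    GoodM m n (List.replicate (m+1) (List.replicate (n+1) 0)) (fun _ _ => 0) := by
  refine ⟨by simp, ?_, ?_⟩
  · intro i hi
    rw [List.getD, List.getElem?_replicate_of_lt (by omega)]
    simp
  · intro i hi j hj
    unfold pvMget
    rw [List.getD, List.getD, List.getElem?_replicate_of_lt (show i < m+1 by omega)]
    simp [List.getElem?_replicate_of_lt (show j < n+1 by omega)]

theorem fold_col0 {m n : Nat} {d : List (List Nat)} {F : Nat → Nat → Nat}
    (h : GoodM m n d F) (t : Nat) (ht : t ≤ m + 1) :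
    GoodM m n ((List.range t).foldl (fun d i => pvMset d i 0 i) d)
      (fun i' j' => if i' < t ∧ j' = 0 then i' else F i' j') := by
  induction t with
  | zero => simpa using GoodM_congr h (by intros; simp)
  | succ t iht =>
    rw [List.range_succ, List.foldl_append, List.foldl_cons, List.foldl_nil]
    refine GoodM_congr (GoodM_set (iht (by omega)) (show t ≤ m by omega) (Nat.zero_le n) t) ?_
    intro i hi j hj
    beta_reduce
    split_ifs <;> first | rfl | omega

theorem fold_row0 {m n : Nat} {d : List (List Nat)} {F : Nat → Nat → Nat}
    (h : GoodM m n d F) (t : Nat) (ht : t ≤ n + 1) :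
    GoodM m n ((List.range t).foldl (fun d j => pvMset d 0 j j) d)
      (fun i' j' => if i' = 0 ∧ j' < t then j' else F i' j') := by
  induction t with
  | zero => simpa using GoodM_congr h (by intros; simp)
  | succ t iht =>
    rw [List.range_succ, List.foldl_append, List.foldl_cons, List.foldl_nil]
    refine GoodM_congr (GoodM_set (iht (by omega)) (Nat.zero_le m) (show t ≤ n by omega) t) ?_
    intro i hi j hj
    beta_reduce
    split_ifs <;> first | rfl | omega

def Gmat (c1 c2 : List Char) (i k : Nat) (i' j' : Nat) : Nat :=
  if i' < i ∨ (i' = i ∧ j' ≤ k) then Emat c1 c2 i' j'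
  else if j' = 0 then i' else if i' = 0 then j' else 0

theorem inner_step (c1 c2 : List Char) (i k : Nat) (hi1 : 1 ≤ i) (hi : i ≤ c1.length)
    (hk : k + 1 ≤ c2.length) {D : List (List Nat)}
    (hg : GoodM c1.length c2.length D (Gmat c1 c2 i k)) :
    GoodM c1.length c2.length
      (if c1.getD (i-1) ' ' = c2.getD ((1+k)-1) ' ' then
        pvMset D i (1+k) (pvMget D (i-1) ((1+k)-1))
      else
        pvMset D i (1+k) (min (pvMget D i ((1+k)-1)) (min (pvMget D (i-1) (1+k)) (pvMget D (i-1) ((1+k)-1))) + 1))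
      (Gmat c1 c2 i (k+1)) := by
  obtain ⟨hlen, hrow, hval⟩ := hg
  have hgg : GoodM c1.length c2.length D (Gmat c1 c2 i k) := ⟨hlen, hrow, hval⟩
  have hsimp : (1+k)-1 = k := by omega
  have e1 : pvMget D (i-1) ((1+k)-1) = Emat c1 c2 (i-1) k := by
    rw [hsimp, hval (i-1) (by omega) k (by omega)]
    simp only [Gmat]
    rw [if_pos (by omega)]
  have e2 : pvMget D i ((1+k)-1) = Emat c1 c2 i k := by
    rw [hsimp, hval i hi k (by omega)]
    simp only [Gmat]
    rw [if_pos (Or.inr ⟨trivial, le_rfl⟩)]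
  have e3 : pvMget D (i-1) (1+k) = Emat c1 c2 (i-1) (k+1) := by
    rw [hval (i-1) (by omega) (1+k) (by omega)]
    simp only [Gmat]
    rw [if_pos (by omega)]
    congr 1; omega
  have hE := Emat_succ c1 c2 i (k+1) hi1 hi (by omega) hk
  have target : ∀ v, v = Emat c1 c2 i (k+1) →
      GoodM c1.length c2.length (pvMset D i (1+k) v) (Gmat c1 c2 i (k+1)) := by
    intro v hv
    subst hv
    have h14 : (1:Nat)+k = k+1 := by omega
    rw [h14]
    refine GoodM_congr (GoodM_set hgg hi hk (Emat c1 c2 i (k+1))) ?_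
    intro i' hi' j' hj'
    beta_reduce
    simp only [Gmat]
    split_ifs <;> first | rfl | omega | (rename_i h1 h2; obtain ⟨rfl, rfl⟩ := h1; rfl)
  by_cases hc : c1.getD (i-1) ' ' = c2.getD ((1+k)-1) ' '
  · rw [if_pos hc, e1]
    refine target _ ?_
    rw [hE, if_pos (by rw [hsimp] at hc; simpa using hc)]
    congr 1
  · rw [if_neg hc, e1, e2, e3]
    refine target _ ?_
    rw [hE, if_neg (by rw [hsimp] at hc; simpa using hc)]
    congr 2

theorem fold_inner (c1 c2 : List Char) {d : List (List Nat)} (i : Nat)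
    (hi1 : 1 ≤ i) (hi : i ≤ c1.length)
    (h : GoodM c1.length c2.length d (Gmat c1 c2 i 0)) (k : Nat) (hk : k ≤ c2.length) :
    GoodM c1.length c2.length
      ((List.range' 1 k).foldl (fun d j =>
        if c1.getD (i-1) ' ' = c2.getD (j-1) ' ' then
          pvMset d i j (pvMget d (i-1) (j-1))
        else
          pvMset d i j (min (pvMget d i (j-1)) (min (pvMget d (i-1) j) (pvMget d (i-1) (j-1))) + 1)) d)
      (Gmat c1 c2 i k) := by
  induction k with
  | zero => exact h
  | succ k ihk =>
    rw [List.range'_1_concat, List.foldl_append, List.foldl_cons, List.foldl_nil]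
    exact inner_step c1 c2 i k hi1 hi hk (ihk (by omega))

theorem fold_outer (c1 c2 : List Char) {d : List (List Nat)}
    (h : GoodM c1.length c2.length d (Gmat c1 c2 0 c2.length)) (t : Nat) (ht : t ≤ c1.length) :
    GoodM c1.length c2.length
      ((List.range' 1 t).foldl (fun d i =>
        (List.range' 1 c2.length).foldl (fun d j =>
          if c1.getD (i-1) ' ' = c2.getD (j-1) ' ' then
            pvMset d i j (pvMget d (i-1) (j-1))
          else
            pvMset d i j (min (pvMget d i (j-1)) (min (pvMget d (i-1) j) (pvMget d (i-1) (j-1))) + 1)) d) d)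
      (Gmat c1 c2 t c2.length) := by
  induction t with
  | zero => exact h
  | succ t iht =>
    rw [List.range'_1_concat, List.foldl_append, List.foldl_cons, List.foldl_nil,
      show (1:Nat)+t = t+1 from by omega]
    refine fold_inner c1 c2 (t+1) (by omega) (by omega) (GoodM_congr (iht (by omega)) ?_) c2.length le_rfl
    intro i' hi' j' hj'
    simp only [Gmat]
    by_cases h1 : i' < t ∨ (i' = t ∧ j' ≤ c2.length)
    · rw [if_pos h1, if_pos (by omega)]
    · rw [if_neg h1]
      by_cases h2 : i' < t+1 ∨ (i' = t+1 ∧ j' ≤ 0)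
      · have h3 : i' = t+1 ∧ j' = 0 := by omega
        obtain ⟨h4, h5⟩ := h3
        subst h4; subst h5
        rw [if_pos h2, if_pos rfl, Emat_zero_right c1 c2 (t+1) (by omega)]
      · rw [if_neg h2]

theorem pvLev_eq (s1 s2 : String) : pvLev s1 s2 = edL s1.toList.reverse s2.toList.reverse := by
  simp only [pvLev]
  have h0 := GoodM_init s1.toList.length s2.toList.length
  have h1 := fold_col0 h0 (s1.toList.length+1) le_rfl
  have h2 := fold_row0 h1 (s2.toList.length+1) le_rfl
  have hc : ∀ i' ≤ s1.toList.length, ∀ j' ≤ s2.toList.length,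
      (if i' = 0 ∧ j' < s2.toList.length + 1 then j'
        else if i' < s1.toList.length + 1 ∧ j' = 0 then i' else 0) =
        Gmat s1.toList s2.toList 0 s2.toList.length i' j' := by
    intro i' hi' j' hj'
    simp only [Gmat]
    by_cases hz : i' = 0
    · subst hz
      rw [if_pos (show (0:Nat) = 0 ∧ j' < s2.toList.length + 1 from ⟨rfl, by omega⟩),
          if_pos (show (0:Nat) < 0 ∨ ((0:Nat) = 0 ∧ j' ≤ s2.toList.length) from by omega),
          Emat_zero_left s1.toList s2.toList j' hj']
    · rw [if_neg (show ¬(i' = 0 ∧ j' < s2.toList.length + 1) from by tauto),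
          if_neg (show ¬(i' < 0 ∨ (i' = 0 ∧ j' ≤ s2.toList.length)) from by omega)]
      by_cases hj0 : j' = 0
      · subst hj0
        rw [if_pos (show i' < s1.toList.length + 1 ∧ (0:Nat) = 0 from ⟨by omega, rfl⟩),
            if_pos (show (0:Nat) = 0 from rfl)]
      · rw [if_neg (show ¬(i' < s1.toList.length + 1 ∧ j' = 0) from by tauto),
            if_neg hj0, if_neg hz]
  have h2' := GoodM_congr h2 hc
  have h3 := fold_outer s1.toList s2.toList h2' s1.toList.length le_rfl
  obtain ⟨_, _, hval⟩ := h3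
  rw [hval s1.toList.length le_rfl s2.toList.length le_rfl]
  simp only [Gmat]
  rw [if_pos (Or.inr ⟨trivial, le_rfl⟩)]
  simp only [Emat, List.take_length]

theorem fuzzy_eq_allClose (window : List (Int × String)) (fence : List String) :
    pvIsFuzzyMatch (window.map Prod.snd) fence 1 = pvAllClose (window.zip fence) := by
  induction window generalizing fence with
  | nil => cases fence <;> simp [pvIsFuzzyMatch, pvFuzzyLoop, pvAllClose]
  | cons l rest ih =>
    cases fence with
    | nil => simp [pvIsFuzzyMatch, pvFuzzyLoop, pvAllClose]
    | cons f fs =>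
      have h := pvLev_eq l.2 f
      have h2 := pvClose_eq l.2.toList f.toList
      simp only [pvIsFuzzyMatch, List.map_cons, List.zip_cons_cons, pvFuzzyLoop, pvAllClose] at *
      rw [h, h2]
      by_cases hle : edL l.2.toList.reverse f.toList.reverse ≤ 1
      · simp [hle, Nat.not_lt.mpr hle, ih fs]
      · simp [hle, Nat.lt_of_not_le hle]

theorem loops_eq (lines : List (Int × String)) (fence : List String) (n : Nat) (idxs : List Int) :
    pvFenceLoop lines fence n idxs = pvAltLoop lines fence n idxs := by
  induction idxs with
  | nil => rfl
  | cons i rest ih =>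
    simp only [pvFenceLoop, pvAltLoop, fuzzy_eq_allClose, ih]

-- ===== VERDICT (by name: the statement is the Claim_ definition above) =====
theorem match_fence_spec : Claim_equal_match_fence := by
  intro lines fence start_index _ _
  unfold Spec_match_fence match_fence match_fence_alt
  simp only [loops_eq]
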